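-- pv_equiv track=rewrite | github.com/HoeYeon/Algorithm | Coding_Test/kakao_2019_intern/1.py | solution
-- ===== SOURCE A (Python) =====
-- def solution(board, moves):
--     answer = 0
--     s = [[] for i in range(len(board[0]))]
--     ba = []
--     for i in range(len(board)-1,-1,-1):
--         for j in range(len(board[i])):
--             if board[i][j] != 0:
--                 s[j].append(board[i][j])
--     for i in range(len(moves)):
--         if len(s[moves[i]-1]) != 0:
--             ba.append(s[moves[i]-1].pop())
--         if len(ba) > 1 and ba[-1] == ba[-2]:
--             ba.pop()
--             ba.pop()
--             answer += 2
--     return answer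
-- ===== SOURCE B (Python) =====
-- def solution(board, moves):
--     n = len(board)
--     top = [0] * len(board[0])  # per-column pointer to the topmost unconsumed row
--     bar = []
--     answer = 0
--     for m in moves:
--         j = m - 1
--         r = top[j]
--         while r < n and board[r][j] == 0:
--             r += 1
--         if r < n:
--             top[j] = r + 1
--             doll = board[r][j]
--             if bar and bar[-1] == doll:
--                 bar.pop()
--                 answer += 2
--             else:
--                 bar.append(doll)
--     return answer
-- ===== Notes on version B (the rewrite author's own statement) =====
-- stated objective: alternative
-- what changed: Replaces A's eager bottom-up construction of per-column stacks (mutated by pops) with a per-column pointer array that lazily scans the untouched board downward for the next doll, and replaces A's append-then-inspect-last-two bar matching with a compare-before-push step; Pre_ excludes empty/ragged boards and out-of-range moves, where A raises or silently treats missing cells of a short row as empty while B's direct cell indexing raises.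
-- outside the precondition, e.g. on solution([[1, 0], [2]], [2]): A returns 0, B raises IndexError
import Mathlib
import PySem

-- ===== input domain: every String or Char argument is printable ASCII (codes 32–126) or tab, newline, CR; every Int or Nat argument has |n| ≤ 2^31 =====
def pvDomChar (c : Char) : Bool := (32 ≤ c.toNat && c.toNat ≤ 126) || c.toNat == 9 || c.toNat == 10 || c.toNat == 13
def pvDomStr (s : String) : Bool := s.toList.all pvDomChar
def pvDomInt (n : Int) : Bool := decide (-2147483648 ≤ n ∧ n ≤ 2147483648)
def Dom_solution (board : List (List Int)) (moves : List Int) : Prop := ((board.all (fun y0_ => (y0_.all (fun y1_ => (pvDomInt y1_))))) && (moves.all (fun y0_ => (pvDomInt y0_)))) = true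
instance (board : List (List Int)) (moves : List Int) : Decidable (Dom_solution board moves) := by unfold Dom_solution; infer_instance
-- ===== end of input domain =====

-- B replaces A's eager bottom-up per-column stacks (mutated by pops) with a lazy per-column
-- pointer array scanning the untouched board downward, and a compare-before-push bar step
-- (objective: alternative; neither side mutates its arguments).

-- ===== PORT A =====
-- inner loop 'for j in range(len(board[i])): if board[i][j] != 0: s[j].append(...)'
def fillCell (row : List Int) (s : List (List Int)) (j : Nat) : List (List Int) :=
  if row.getD j 0 ≠ 0 then s.set j (s.getD j [] ++ [row.getD j 0]) else s

def fillRow (s : List (List Int)) (row : List Int) : List (List Int) :=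
  (List.range row.length).foldl (fillCell row) s

-- one iteration of A's moves loop; s[moves[i]-1] is read/written with Python index
-- semantics (negative wraparound) via PySem.List.pyGetD / pySetD
def stepA (st : List (List Int) × List Int × Int) (m : Int) : List (List Int) × List Int × Int :=
  let s := st.1
  let st1 :=
    if (PySem.List.pyGetD s (m - 1) ([] : List Int)).length ≠ 0 then
      (PySem.List.pySetD s (m - 1) (PySem.List.pyGetD s (m - 1) ([] : List Int)).dropLast,
       st.2.1 ++ [PySem.List.pyGetD (PySem.List.pyGetD s (m - 1) ([] : List Int)) (-1) 0])
    else (s, st.2.1)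
  if st1.2.length > 1 ∧ PySem.List.pyGetD st1.2 (-1) 0 = PySem.List.pyGetD st1.2 (-2) 0 then
    (st1.1, st1.2.dropLast.dropLast, st.2.2 + 2)
  else (st1.1, st1.2, st.2.2)

def solution (board : List (List Int)) (moves : List Int) : Int :=
  let C := (board.headD []).length
  let s1 := (List.range board.length).reverse.foldl
      (fun s i => fillRow s (board.getD i [])) (List.replicate C ([] : List Int))
  (moves.foldl stepA (s1, ([] : List Int), (0 : Int))).2.2

-- ===== PORT B =====
-- 'while r < n and board[r][j] == 0: r += 1'; j is a Python index (may be negative),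
-- so the row is read with PySem.List.pyGetD
def scanCol (board : List (List Int)) (n : Nat) (j : Int) (r : Nat) : Nat :=
  if h : r < n then
    (if PySem.List.pyGetD (board.getD r []) j 0 = 0 then scanCol board n j (r + 1) else r)
  else r
termination_by n - r

def stepB (board : List (List Int)) (n : Nat) (st : List Nat × List Int × Int)
    (m : Int) : List Nat × List Int × Int :=
  let j := m - 1
  let r := scanCol board n j (PySem.List.pyGetD st.1 j 0)
  if r < n then
    let doll := PySem.List.pyGetD (board.getD r []) j 0
    if st.2.1 ≠ [] ∧ st.2.1.getLast?.getD 0 = doll then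
      (PySem.List.pySetD st.1 j (r + 1), st.2.1.dropLast, st.2.2 + 2)
    else (PySem.List.pySetD st.1 j (r + 1), st.2.1 ++ [doll], st.2.2)
  else st

def solution_alt (board : List (List Int)) (moves : List Int) : Int :=
  let n := board.length
  (moves.foldl (stepB board n)
    (List.replicate (board.headD []).length 0, ([] : List Int), (0 : Int))).2.2

-- ===== PRECONDITION & SPEC =====
-- Pre_ excludes empty boards and out-of-range moves (on which A raises IndexError), and
-- ragged boards, on which A either raises (a row longer than the first) or silently treats
-- a short row's missing cells as empty while B's direct cell indexing raises.
def Pre_solution (board : List (List Int)) (moves : List Int) : Prop :=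
  board ≠ [] ∧
  (∀ row ∈ board, row.length = (board.headD []).length) ∧
  (∀ m ∈ moves, 1 - ((board.headD []).length : Int) ≤ m ∧ m ≤ ((board.headD []).length : Int))
instance (board : List (List Int)) (moves : List Int) : Decidable (Pre_solution board moves) := by
  unfold Pre_solution; infer_instance

def pvWitness_solution : List (List Int) × List Int := ([[0, 1], [2, 1]], [1, 2, 2])

def Spec_solution (board : List (List Int)) (moves : List Int) (out : Int) : Prop := out = solution_alt board moves
instance (board : List (List Int)) (moves : List Int) (out : Int) : Decidable (Spec_solution board moves out) := by unfold Spec_solution; infer_instance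

-- ===== CLAIM (what is proved, stated in full; the proofs are below) =====
def Claim_equal_solution : Prop := ∀ (board : List (List Int)) (moves : List Int), Dom_solution board moves → Pre_solution board moves → Spec_solution board moves (solution board moves)

-- ===== LEMMAS AND PROOFS =====

-- the doll (nonzero cell) of a row in column jn, if any
def pickCell (jn : Nat) (row : List Int) : Option Int :=
  if row.getD jn 0 ≠ 0 then some (row.getD jn 0) else none

-- column jn's dolls, top row first
def colFrom (jn : Nat) (rows : List (List Int)) : List Int := rows.filterMap (pickCell jn)

-- the relation between A's stack array and B's pointer array
def InvST (board : List (List Int)) (C : Nat) (s : List (List Int)) (top : List Nat) : Prop :=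
  s.length = C ∧ top.length = C ∧
  ∀ j, j < C → top.getD j 0 ≤ board.length ∧
    s.getD j [] = (colFrom j (board.drop (top.getD j 0))).reverse

lemma int_mod_eq (n : Nat) (i : Int) : PySem.Int.mod i (n : Int) = i % (n : Int) := by
  unfold PySem.Int.mod
  rw [Int.fmod_eq_emod]
  simp

lemma pyIdx_wrap (n : Nat) (i : Int) (h1 : -(n : Int) ≤ i) (h2 : i < (n : Int)) :
    PySem.List.pyIdx? n i = some ((PySem.Int.mod i (n : Int)).toNat) := by
  rw [int_mod_eq]
  unfold PySem.List.pyIdx?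
  by_cases h0 : 0 ≤ i
  · rw [if_pos h0, if_pos h2]
    rw [Int.emod_eq_of_lt h0 h2]
  · rw [if_neg h0, if_pos h1]
    have e1 : (i + (n : Int)) % (n : Int) = i % (n : Int) := by
      have h := Int.add_mul_emod_self_left (a := i) (b := (n : Int)) (c := 1)
      simp only [mul_one] at h
      exact h
    have e2 : (i + (n : Int)) % (n : Int) = i + (n : Int) :=
      Int.emod_eq_of_lt (by omega) (by omega)
    have e3 : i % (n : Int) = i + (n : Int) := by rw [← e1, e2]
    rw [e3]
    congr 1
    omega

lemma mod_toNat_lt (n : Nat) (i : Int) (hn : 0 < n) :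
    (PySem.Int.mod i (n : Int)).toNat < n := by
  rw [int_mod_eq]
  have h1 : i % (n : Int) < (n : Int) := Int.emod_lt_of_pos i (by exact_mod_cast hn)
  have h2 : 0 ≤ i % (n : Int) := Int.emod_nonneg i (by positivity)
  omega

lemma pyGetD_wrap {α : Type} (xs : List α) (i : Int) (d : α)
    (h1 : -(xs.length : Int) ≤ i) (h2 : i < (xs.length : Int)) :
    PySem.List.pyGetD xs i d = xs.getD (PySem.Int.mod i (xs.length : Int)).toNat d := by
  unfold PySem.List.pyGetD PySem.List.pyGet?
  rw [pyIdx_wrap xs.length i h1 h2]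
  simp [List.getD_eq_getElem?_getD]

lemma pySetD_wrap {α : Type} (xs : List α) (i : Int) (v : α)
    (h1 : -(xs.length : Int) ≤ i) (h2 : i < (xs.length : Int)) :
    PySem.List.pySetD xs i v = xs.set (PySem.Int.mod i (xs.length : Int)).toNat v := by
  unfold PySem.List.pySetD PySem.List.pySet?
  rw [pyIdx_wrap xs.length i h1 h2]
  simp

lemma pyGetD_neg_two {α : Type} (l : List α) (a b d : α) :
    PySem.List.pyGetD (l ++ [a, b]) (-2) d = a := by
  unfold PySem.List.pyGetD PySem.List.pyGet? PySem.List.pyIdx?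
  have hlen : (l ++ [a, b]).length = l.length + 2 := by simp
  rw [hlen]
  rw [if_neg (by omega), if_pos (by push_cast; omega)]
  have h2 : ((-(-2 : Int)).toNat) = 2 := by decide
  rw [h2]
  simp only [Option.bind_some]
  rw [List.getElem?_append_right (by omega)]
  simp

lemma getD_set_self {α : Type} (s : List α) (j : Nat) (v d : α) (h : j < s.length) :
    (s.set j v).getD j d = v := by
  simp [List.getD_eq_getElem?_getD, h]

lemma getD_set_ne {α : Type} (s : List α) (j j' : Nat) (v d : α) (h : j ≠ j') :
    (s.set j v).getD j' d = s.getD j' d := by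
  simp [List.getD_eq_getElem?_getD, h]

lemma chain_last_two (ba : List Int) (hch : List.IsChain (· ≠ ·) ba) (h : ba.length > 1) :
    ¬ (PySem.List.pyGetD ba (-1) 0 = PySem.List.pyGetD ba (-2) 0) := by
  obtain ⟨t, x, y, rfl⟩ : ∃ t x y, ba = t ++ [x, y] := by
    rcases hr : ba.reverse with _ | ⟨y, tl⟩
    · rw [List.reverse_eq_nil_iff] at hr; subst hr; simp at h
    · rcases tl with _ | ⟨x, t⟩
      · have hb : ba = [y] := by have := congrArg List.reverse hr; simpa using this
        subst hb; simp at h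
      · refine ⟨t.reverse, x, y, ?_⟩
        have := congrArg List.reverse hr
        simpa using this
  have h1 : PySem.List.pyGetD (t ++ [x, y]) (-1) 0 = y := by
    have := PySem.List.pyGetD_neg_one_append_singleton (t ++ [x]) y 0
    simpa using this
  rw [h1, pyGetD_neg_two]
  rw [show t ++ [x, y] = t ++ [x] ++ [y] by simp] at hch
  rw [List.isChain_append] at hch
  intro he
  exact hch.2.2 x (by simp) y (by simp) he.symm

-- ===== fill phase =====

lemma foldl_fillCell_length (row : List Int) :
    ∀ (l : List Nat) (s : List (List Int)), ((l.foldl (fillCell row) s).length = s.length) := by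
  intro l
  induction l with
  | nil => intro s; rfl
  | cons x xs ih =>
    intro s
    simp only [List.foldl_cons, ih]
    unfold fillCell; split <;> simp

lemma fillRow_length (s : List (List Int)) (row : List Int) :
    (fillRow s row).length = s.length := foldl_fillCell_length row _ s

lemma foldl_fillCell_getD (row : List Int) :
    ∀ (L : Nat) (s : List (List Int)) (j : Nat), j < s.length →
      ((List.range L).foldl (fillCell row) s).getD j [] =
        s.getD j [] ++ (if j < L ∧ row.getD j 0 ≠ 0 then [row.getD j 0] else []) := by
  intro L
  induction L with
  | zero => intro s j hjs; simp
  | succ L ih =>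
    intro s j hjs
    rw [List.range_succ, List.foldl_append, List.foldl_cons, List.foldl_nil]
    have hlen : ((List.range L).foldl (fillCell row) s).length = s.length :=
      foldl_fillCell_length row _ s
    by_cases hj : j = L
    · subst hj
      have hprev : ((List.range j).foldl (fillCell row) s).getD j [] = s.getD j [] := by
        rw [ih s j hjs]; simp
      rw [fillCell]
      by_cases hv : row.getD j 0 ≠ 0
      · rw [if_pos hv, getD_set_self _ _ _ _ (by omega), hprev, if_pos ⟨by omega, hv⟩]
      · rw [if_neg hv, hprev, if_neg (by tauto)]
        simp
    · have hiff : (j < L + 1 ∧ row.getD j 0 ≠ 0) ↔ (j < L ∧ row.getD j 0 ≠ 0) := by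
        constructor <;> rintro ⟨ha, hb⟩ <;> exact ⟨by omega, hb⟩
      simp only [hiff]
      rw [← ih s j hjs]
      rw [fillCell]
      by_cases hv : row.getD L 0 ≠ 0
      · rw [if_pos hv, getD_set_ne _ _ _ _ _ (fun e => hj e.symm)]
      · rw [if_neg hv]

lemma fillRow_getD (s : List (List Int)) (row : List Int) (j : Nat) (h : j < s.length) :
    (fillRow s row).getD j [] = s.getD j [] ++ colFrom j [row] := by
  unfold fillRow
  rw [foldl_fillCell_getD row row.length s j h]
  congr 1
  simp only [colFrom, pickCell, List.filterMap_cons, List.filterMap_nil]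
  by_cases hjr : j < row.length
  · by_cases hv : row.getD j 0 ≠ 0
    · rw [if_pos ⟨hjr, hv⟩, if_pos hv]
    · rw [if_neg (by tauto), if_neg hv]
  · have hz : row.getD j 0 = 0 := List.getD_eq_default _ _ (by omega)
    rw [if_neg (by tauto), if_neg (by rw [hz]; simp)]

lemma foldl_fillRow_length :
    ∀ (rows : List (List Int)) (s : List (List Int)),
      (rows.foldl fillRow s).length = s.length := by
  intro rows
  induction rows with
  | nil => intro s; rfl
  | cons r rs ih => intro s; simp only [List.foldl_cons, ih, fillRow_length]

lemma foldl_fillRow_getD :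
    ∀ (rows : List (List Int)) (s : List (List Int)) (j : Nat), j < s.length →
      (rows.foldl fillRow s).getD j [] = s.getD j [] ++ colFrom j rows := by
  intro rows
  induction rows with
  | nil => intro s j h; simp [colFrom]
  | cons row rs ih =>
    intro s j h
    rw [List.foldl_cons, ih (fillRow s row) j (by rw [fillRow_length]; exact h),
      fillRow_getD s row j h, List.append_assoc]
    congr 1
    simp only [colFrom, List.filterMap_cons, List.filterMap_nil]
    cases pickCell j row <;> simp

lemma map_getD_range (board : List (List Int)) :
    (List.range board.length).map (fun i => board.getD i []) = board := by
  apply List.ext_getElem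
  · simp
  · intro i h1 h2
    simp [List.getD_eq_getElem?_getD, List.getElem?_eq_getElem h2]

lemma buildS_eq (board : List (List Int)) (C : Nat) :
    (List.range board.length).reverse.foldl (fun s i => fillRow s (board.getD i []))
        (List.replicate C ([] : List Int)) =
      board.reverse.foldl fillRow (List.replicate C ([] : List Int)) := by
  conv_rhs => rw [← map_getD_range board]
  rw [← List.map_reverse, List.foldl_map]

-- ===== scan phase =====

lemma scanCol_spec_aux (board : List (List Int)) (j : Int) (jn : Nat)
    (hrow : ∀ r, r < board.length →
      PySem.List.pyGetD (board.getD r []) j 0 = (board.getD r []).getD jn 0) :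
    ∀ (k r : Nat), board.length - r ≤ k → r ≤ board.length →
      ((colFrom jn (board.drop r) = [] → scanCol board board.length j r = board.length) ∧
       (∀ d rest, colFrom jn (board.drop r) = d :: rest →
         scanCol board board.length j r < board.length ∧
         (board.getD (scanCol board board.length j r) []).getD jn 0 = d ∧
         colFrom jn (board.drop (scanCol board board.length j r + 1)) = rest)) := by
  intro k
  induction k with
  | zero =>
    intro r hk hr
    have hr' : r = board.length := by omega
    subst hr'
    have hnil : board.drop board.length = [] := by simp
    rw [hnil]
    constructor
    · intro _; rw [scanCol]; simp
    · intro d rest hc; simp [colFrom] at hc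
  | succ k ih =>
    intro r hk hr
    by_cases hrn : r < board.length
    · have hdrop : board.drop r = board[r] :: board.drop (r + 1) :=
        List.drop_eq_getElem_cons hrn
      have hrowr : board.getD r [] = board[r] := by
        simp [List.getD_eq_getElem?_getD, List.getElem?_eq_getElem hrn]
      rw [scanCol, dif_pos hrn, hrow r hrn]
      by_cases hg : (board.getD r []).getD jn 0 = 0
      · rw [if_pos hg]
        have hpick : pickCell jn board[r] = none := by
          unfold pickCell
          rw [if_neg (by rw [← hrowr]; simpa using hg)]
        have hcol : colFrom jn (board.drop r) = colFrom jn (board.drop (r + 1)) := by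
          rw [hdrop]
          simp only [colFrom, List.filterMap_cons, hpick]
        rw [hcol]
        exact ih (r + 1) (by omega) (by omega)
      · rw [if_neg hg]
        have hpick : pickCell jn board[r] = some (board[r].getD jn 0) := by
          unfold pickCell
          rw [if_pos (by rw [← hrowr]; exact hg)]
        have hcol : colFrom jn (board.drop r) = board[r].getD jn 0 :: colFrom jn (board.drop (r + 1)) := by
          rw [hdrop]
          simp only [colFrom, List.filterMap_cons, hpick]
        constructor
        · intro hc; rw [hcol] at hc; exact absurd hc (by simp)
        · intro d rest hc
          rw [hcol] at hc
          obtain ⟨rfl, rfl⟩ : board[r].getD jn 0 = d ∧ colFrom jn (board.drop (r + 1)) = rest := by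
            constructor <;> [exact (List.cons.injEq _ _ _ _ ▸ hc).1; exact (List.cons.injEq _ _ _ _ ▸ hc).2]
          exact ⟨hrn, by rw [hrowr], rfl⟩
    · have hr' : r = board.length := by omega
      subst hr'
      have hnil : board.drop board.length = [] := by simp
      rw [hnil]
      constructor
      · intro _; rw [scanCol]; simp
      · intro d rest hc; simp [colFrom] at hc

-- ===== step equality =====

lemma step_eq (board : List (List Int)) (C : Nat) (m : Int)
    (hrect : ∀ row ∈ board, row.length = C)
    (hm1 : 1 - (C : Int) ≤ m) (hm2 : m ≤ (C : Int))
    (s : List (List Int)) (top : List Nat) (ba : List Int) (ans : Int)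
    (hinv : InvST board C s top) (hch : List.IsChain (· ≠ ·) ba) :
    ∃ s' top' ba' ans',
      stepA (s, ba, ans) m = (s', ba', ans') ∧
      stepB board board.length (top, ba, ans) m = (top', ba', ans') ∧
      InvST board C s' top' ∧ List.IsChain (· ≠ ·) ba' := by
  obtain ⟨hsl, htl, hj⟩ := hinv
  have hC : 0 < C := by omega
  have hi1 : -(C : Int) ≤ m - 1 := by omega
  have hi2 : m - 1 < (C : Int) := by omega
  set jn := (PySem.Int.mod (m - 1) (C : Int)).toNat with hjdef
  have hjC : jn < C := mod_toNat_lt C (m - 1) hC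
  have hget := pyGetD_wrap s (m - 1) ([] : List Int) (by rw [hsl]; exact hi1) (by rw [hsl]; exact hi2)
  rw [hsl] at hget
  have hgetT := pyGetD_wrap top (m - 1) (0 : Nat) (by rw [htl]; exact hi1) (by rw [htl]; exact hi2)
  rw [htl] at hgetT
  have hrow : ∀ r, r < board.length →
      PySem.List.pyGetD (board.getD r []) (m - 1) 0 = (board.getD r []).getD jn 0 := by
    intro r hrn
    have hmem : board.getD r [] ∈ board := by
      rw [List.getD_eq_getElem?_getD, List.getElem?_eq_getElem hrn]
      exact List.getElem_mem hrn
    have hlen : (board.getD r []).length = C := hrect _ hmem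
    have := pyGetD_wrap (board.getD r []) (m - 1) (0 : Int)
      (by rw [hlen]; exact hi1) (by rw [hlen]; exact hi2)
    rw [hlen] at this
    exact this
  have hr_le := (hj jn hjC).1
  have hcolj := (hj jn hjC).2
  have hscan := scanCol_spec_aux board (m - 1) jn hrow board.length (top.getD jn 0) (by omega) hr_le
  rcases hcase : colFrom jn (board.drop (top.getD jn 0)) with _ | ⟨d, rest⟩
  · -- empty column: both sides do nothing
    have hstack : s.getD jn [] = [] := by rw [hcolj, hcase]; rfl
    have hscanE : scanCol board board.length (m - 1) (top.getD jn 0) = board.length := hscan.1 hcase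
    refine ⟨s, top, ba, ans, ?_, ?_, ⟨hsl, htl, hj⟩, hch⟩
    · simp only [stepA]
      rw [hget, hstack]
      split_ifs with h1 h2 h3
      · simp at h1
      · simp at h1
      · exact absurd h3.2 (chain_last_two ba hch h3.1)
      · rfl
    · simp only [stepB]
      rw [hgetT, ← hjdef, hscanE, if_neg (by omega)]
  · -- a doll d is picked from column jn
    obtain ⟨hrn, hcell, hrest⟩ := hscan.2 d rest hcase
    set r' := scanCol board board.length (m - 1) (top.getD jn 0) with hr'def
    have hstack : s.getD jn [] = rest.reverse ++ [d] := by rw [hcolj, hcase]; simp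
    have hset := pySetD_wrap s (m - 1) rest.reverse (by rw [hsl]; exact hi1) (by rw [hsl]; exact hi2)
    rw [hsl] at hset
    have hsetT := pySetD_wrap top (m - 1) (r' + 1) (by rw [htl]; exact hi1) (by rw [htl]; exact hi2)
    rw [htl] at hsetT
    have hinv' : InvST board C (s.set jn rest.reverse) (top.set jn (r' + 1)) := by
      refine ⟨by simp [hsl], by simp [htl], fun j' hj' => ?_⟩
      by_cases hjj : j' = jn
      · subst hjj
        rw [getD_set_self _ _ _ _ (by omega), getD_set_self _ _ _ _ (by omega)]
        exact ⟨by omega, by rw [hrest]⟩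
      · rw [getD_set_ne _ _ _ _ _ (fun e => hjj e.symm),
          getD_set_ne _ _ _ _ _ (fun e => hjj e.symm)]
        exact hj j' hj'
    have hdoll : PySem.List.pyGetD (board.getD r' []) (m - 1) 0 = d := by
      rw [hrow r' hrn, hcell]
    rcases ba.eq_nil_or_concat with rfl | ⟨t, a, rfl⟩
    · -- empty bar: push d
      refine ⟨s.set jn rest.reverse, top.set jn (r' + 1), [d], ans, ?_, ?_, hinv', by simp⟩
      · simp only [stepA]
        rw [hget, hstack]
        split_ifs with h1 h2 h3
        · simp at h2
        · rw [List.dropLast_concat, PySem.List.pyGetD_neg_one_append_singleton, hset, ← hjdef]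
          simp
        · simp at h1
        · simp at h1
      · simp only [stepB]
        rw [hgetT, ← hjdef, ← hr'def, if_pos hrn, hdoll, if_neg (by simp), hsetT, ← hjdef]
        simp
    · simp only [List.concat_eq_append] at hch ⊢
      by_cases hda : a = d
      · -- match: pop and score
        have hchd := hch.dropLast
        rw [List.dropLast_concat] at hchd
        refine ⟨s.set jn rest.reverse, top.set jn (r' + 1), t, ans + 2, ?_, ?_, hinv', hchd⟩
        · have hneg2 : PySem.List.pyGetD (t ++ [a] ++ [d]) (-2) 0 = a := by
            rw [show t ++ [a] ++ [d] = t ++ [a, d] by simp, pyGetD_neg_two]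
          simp only [stepA]
          rw [hget, hstack]
          split_ifs with h1 h2 h3
          · rw [List.dropLast_concat, PySem.List.pyGetD_neg_one_append_singleton, hset,
              List.dropLast_concat, List.dropLast_concat, ← hjdef]
          · exfalso
            rw [PySem.List.pyGetD_neg_one_append_singleton] at h2
            exact h2 ⟨by simp, by rw [PySem.List.pyGetD_neg_one_append_singleton, hneg2]; exact hda.symm⟩
          · simp at h1
          · simp at h1
        · simp only [stepB]
          rw [hgetT, ← hjdef, ← hr'def, if_pos hrn, hdoll,
            if_pos ⟨by simp, by rw [List.getLast?_concat]; simpa using hda⟩,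
            List.dropLast_concat, hsetT, ← hjdef]
      · -- no match: push d
        have hch' : List.IsChain (· ≠ ·) (t ++ [a] ++ [d]) := by
          rw [List.isChain_append]
          refine ⟨hch, by simp, ?_⟩
          intro x hx y hy
          rw [List.getLast?_concat] at hx
          simp at hx hy
          subst hx
          subst hy
          exact hda
        refine ⟨s.set jn rest.reverse, top.set jn (r' + 1), t ++ [a] ++ [d], ans, ?_, ?_, hinv', hch'⟩
        · have hneg2 : PySem.List.pyGetD (t ++ [a] ++ [d]) (-2) 0 = a := by
            rw [show t ++ [a] ++ [d] = t ++ [a, d] by simp, pyGetD_neg_two]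
          simp only [stepA]
          rw [hget, hstack]
          split_ifs with h1 h2 h3
          · exfalso
            rw [PySem.List.pyGetD_neg_one_append_singleton] at h2
            rw [PySem.List.pyGetD_neg_one_append_singleton, hneg2] at h2
            exact hda h2.2.symm
          · rw [List.dropLast_concat, PySem.List.pyGetD_neg_one_append_singleton, hset, ← hjdef]
          · simp at h1
          · simp at h1
        · simp only [stepB]
          rw [hgetT, ← hjdef, ← hr'def, if_pos hrn, hdoll]
          rw [if_neg (by
            rintro ⟨-, he⟩
            rw [List.getLast?_concat] at he
            exact hda (by simpa using he))]
          rw [hsetT, ← hjdef]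

lemma loop_eq (board : List (List Int)) (C : Nat)
    (hrect : ∀ row ∈ board, row.length = C) :
    ∀ (moves : List Int) (s : List (List Int)) (top : List Nat) (ba : List Int) (ans : Int),
      (∀ m ∈ moves, 1 - (C : Int) ≤ m ∧ m ≤ (C : Int)) →
      InvST board C s top → List.IsChain (· ≠ ·) ba →
      (moves.foldl stepA (s, ba, ans)).2.2 =
        (moves.foldl (stepB board board.length) (top, ba, ans)).2.2 := by
  intro moves
  induction moves with
  | nil => intro s top ba ans _ _ _; rfl
  | cons m ms ih =>
    intro s top ba ans hb hinv hch
    obtain ⟨s', top', ba', ans', hA, hB, hinv', hch'⟩ :=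
      step_eq board C m hrect (hb m (by simp)).1 (hb m (by simp)).2 s top ba ans hinv hch
    simp only [List.foldl_cons, hA, hB]
    exact ih s' top' ba' ans' (fun x hx => hb x (by simp [hx])) hinv' hch'

-- ===== VERDICT (by name: the statement is the Claim_ definition above) =====
theorem solution_spec : Claim_equal_solution := by
  intro board moves _hdom hpre
  obtain ⟨hne, hrows, hmoves⟩ := hpre
  unfold Spec_solution solution solution_alt
  have hinit : InvST board ((board.headD []).length)
      ((List.range board.length).reverse.foldl (fun s i => fillRow s (board.getD i []))
        (List.replicate ((board.headD []).length) ([] : List Int)))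
      (List.replicate ((board.headD []).length) 0) := by
    rw [buildS_eq]
    refine ⟨by rw [foldl_fillRow_length]; simp, by simp, fun j hj => ?_⟩
    rw [List.getD_replicate 0 hj]
    refine ⟨by omega, ?_⟩
    rw [foldl_fillRow_getD _ _ j (by simpa using hj), List.getD_replicate [] hj]
    simp only [List.nil_append, List.drop_zero, colFrom, List.filterMap_reverse]
  exact loop_eq board ((board.headD []).length) hrows moves _ _ [] 0 hmoves hinit (by simp)
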